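-- pv_equiv track=rewrite | github.com/top1Dron/myhouse | src/myhouse_admin/utils/utils.py | translate_month_to_ukr
-- ===== SOURCE A (Python) =====
-- def translate_month_to_ukr(date: str):
--     month_en = ('January', 'Fabuary', 'March', 'April', 'May',
--         'June', 'July', 'August', 'September',
--         'October', 'November', 'December')
--     month_ua = ('Сiчень', 'Лютий', 'Березень', 'Квiтень', 'Трвавень',
--         'Червень', 'Липень', 'Серпень', 'Вересень',
--         'Жовтень', 'Листопад', 'Грудень')
--     for month in zip(month_en, month_ua):
--         date = date.replace(month[0], month[1])
--     return date
-- ===== SOURCE B (Python) =====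
-- import re
--
-- _MONTHS = {
--     'January': 'Сiчень', 'Fabuary': 'Лютий', 'March': 'Березень',
--     'April': 'Квiтень', 'May': 'Трвавень', 'June': 'Червень',
--     'July': 'Липень', 'August': 'Серпень', 'September': 'Вересень',
--     'October': 'Жовтень', 'November': 'Листопад', 'December': 'Грудень',
-- }
-- _PATTERN = re.compile('|'.join(_MONTHS))
--
--
-- def translate_month_to_ukr(date: str):
--     return _PATTERN.sub(lambda m: _MONTHS[m.group(0)], date)
-- ===== Notes on version B (the rewrite author's own statement) =====
-- stated objective: idiomatic
-- what changed: Replaces twelve sequential full-string str.replace passes with a dict of translations and one precompiled regex alternation applied in a single left-to-right re.sub pass.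
import Mathlib
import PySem

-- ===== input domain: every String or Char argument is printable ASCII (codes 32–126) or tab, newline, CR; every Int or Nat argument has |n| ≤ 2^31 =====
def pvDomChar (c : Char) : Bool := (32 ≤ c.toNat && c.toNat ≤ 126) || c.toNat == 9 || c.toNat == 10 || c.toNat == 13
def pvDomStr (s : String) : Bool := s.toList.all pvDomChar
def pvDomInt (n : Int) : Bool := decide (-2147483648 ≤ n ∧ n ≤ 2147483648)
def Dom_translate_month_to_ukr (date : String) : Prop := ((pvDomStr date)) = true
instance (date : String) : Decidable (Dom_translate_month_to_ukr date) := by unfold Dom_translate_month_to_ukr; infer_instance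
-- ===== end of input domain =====

-- B replaces A's twelve sequential str.replace passes by one table-driven left-to-right pass
-- (regex alternation in Python); equivalence of the RETURN value is proved for all inputs in Dom.

-- ===== PORT A =====
def pvMonthEn : List String :=
  ["January", "Fabuary", "March", "April", "May",
   "June", "July", "August", "September",
   "October", "November", "December"]

def pvMonthUa : List String :=
  ["Сiчень", "Лютий", "Березень", "Квiтень", "Трвавень",
   "Червень", "Липень", "Серпень", "Вересень",
   "Жовтень", "Листопад", "Грудень"]

-- the for-loop over zip(month_en, month_ua), each step date = date.replace(en, ua)
def translate_month_to_ukr (date : String) : String :=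
  (pvMonthEn.zip pvMonthUa).foldl (fun d m => PySem.Str.replace d m.1 m.2) date

-- ===== PORT B =====
-- the dict MONTHS of Source B, as (English, Ukrainian) pairs in insertion (= alternation) order
def pvMonths : List (List Char × List Char) :=
  [("January".toList, "Сiчень".toList), ("Fabuary".toList, "Лютий".toList),
   ("March".toList, "Березень".toList), ("April".toList, "Квiтень".toList),
   ("May".toList, "Трвавень".toList), ("June".toList, "Червень".toList),
   ("July".toList, "Липень".toList), ("August".toList, "Серпень".toList),
   ("September".toList, "Вересень".toList), ("October".toList, "Жовтень".toList),
   ("November".toList, "Листопад".toList), ("December".toList, "Грудень".toList)]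

-- hand port of PATTERN.sub(lambda m: MONTHS[m.group(0)], date): one left-to-right scan; at each
-- position the first '|'-alternative that matches wins, the match is replaced and skipped.
-- Exact for this pattern (plain literal alternatives, no metacharacters); fuel = length is a
-- totality guard only, never exhausted since every alternative is nonempty.
def pvScan (T : List (List Char × List Char)) : Nat → List Char → List Char
  | 0, s => s
  | _ + 1, [] => []
  | f + 1, c :: t =>
    match T.find? (fun m => m.1.isPrefixOf (c :: t)) with
    | some m => m.2 ++ pvScan T f ((c :: t).drop m.1.length)
    | none => c :: pvScan T f t

def translate_month_to_ukr_alt (date : String) : String :=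
  String.ofList (pvScan pvMonths date.toList.length date.toList)

-- ===== PRECONDITION & SPEC =====
def Spec_translate_month_to_ukr (date : String) (out : String) : Prop := out = translate_month_to_ukr_alt date
instance (date : String) (out : String) : Decidable (Spec_translate_month_to_ukr date out) := by unfold Spec_translate_month_to_ukr; infer_instance

-- ===== CLAIM (what is proved, stated in full; the proofs are below) =====
def Claim_equal_translate_month_to_ukr : Prop := ∀ (date : String), Dom_translate_month_to_ukr date → Spec_translate_month_to_ukr date (translate_month_to_ukr date)

-- ===== LEMMAS AND PROOFS =====

-- structural version of PySem.Chars.replace for a nonempty pattern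
def pvRepl (p u : List Char) : List Char → List Char
  | [] => []
  | c :: t =>
    if p.isPrefixOf (c :: t) then u ++ pvRepl p u (t.drop (p.length - 1))
    else c :: pvRepl p u t
termination_by s => s.length
decreasing_by
  · simp only [List.length_drop, List.length_cons]; omega
  · simp only [List.length_cons]; omega

-- A's 12 passes, on the char-list side
def pvChain (T : List (List Char × List Char)) (s : List Char) : List Char :=
  T.foldl (fun s m => pvRepl m.1 m.2 s) s

-- first characters of the patterns of a table
def pvHeads (T : List (List Char × List Char)) : List Char :=
  T.filterMap (fun m => m.1.head?)

-- the non-interference conditions the concrete table satisfies (checked by decide below):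
-- nonempty ASCII patterns whose tails avoid every pattern head, nonempty replacements starting
-- with a non-ASCII character and avoiding every pattern head, and no pattern a prefix of another
def pvGood (T : List (List Char × List Char)) : Prop :=
  ∀ m ∈ T, m.1 ≠ [] ∧
    (∀ c ∈ m.1, c.toNat ≤ 127) ∧
    (m.2 ≠ [] ∧ 127 < (m.2.headD ' ').toNat) ∧
    (∀ c ∈ m.1.tail, c ∉ pvHeads T) ∧
    (∀ c ∈ m.2, c ∉ pvHeads T) ∧
    (∀ m' ∈ T, m'.1 ≠ m.1 → ¬ m'.1 <+: m.1)

theorem pvGood_cons {m : List Char × List Char} {T : List (List Char × List Char)}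
    (h : pvGood (m :: T)) : pvGood T := by
  intro m' hm'
  obtain ⟨h1, h2, h3, h4, h5, h6⟩ := h m' (List.mem_cons_of_mem m hm')
  have hsub : ∀ x, x ∈ pvHeads T → x ∈ pvHeads (m :: T) := by
    intro x hx
    rw [pvHeads, List.mem_filterMap] at hx ⊢
    obtain ⟨a, ha, hfa⟩ := hx
    exact ⟨a, List.mem_cons_of_mem m ha, hfa⟩
  refine ⟨h1, h2, h3, ?_, ?_, ?_⟩
  · intro c hc hmem; exact h4 c hc (hsub c hmem)
  · intro c hc hmem; exact h5 c hc (hsub c hmem)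
  · intro m'' hm'' ; exact h6 m'' (List.mem_cons_of_mem m hm'')

theorem pvExists_cons {l : List Char} (h : l ≠ []) : ∃ a t, l = a :: t := by
  cases l with
  | nil => exact absurd rfl h
  | cons a t => exact ⟨a, t, rfl⟩

theorem pvRepl_nil (p u : List Char) : pvRepl p u [] = [] := by
  simp [pvRepl]

theorem pvChain_nil (T : List (List Char × List Char)) : pvChain T [] = [] := by
  induction T with
  | nil => rfl
  | cons m T ih => simpa [pvChain, pvRepl_nil] using ih

-- PySem.Chars.replace.go with enough fuel is pvRepl
theorem pvGo_eq (p u : List Char) (hp : p ≠ []) :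
    ∀ (fuel : Nat) (l acc : List Char), l.length ≤ fuel →
      PySem.Chars.replace.go p u fuel l acc = acc.reverse ++ pvRepl p u l := by
  intro fuel
  induction fuel with
  | zero =>
    intro l acc hl
    have : l = [] := List.eq_nil_of_length_eq_zero (Nat.le_zero.mp hl)
    subst this; simp [PySem.Chars.replace.go, pvRepl_nil]
  | succ f ih =>
    intro l acc hl
    match l with
    | [] => simp [PySem.Chars.replace.go, pvRepl_nil]
    | c :: t =>
      rw [PySem.Chars.replace.go]
      by_cases h : p.isPrefixOf (c :: t)
      · obtain ⟨ph, pt, rfl⟩ : ∃ ph pt, p = ph :: pt := by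
          cases p with | nil => exact absurd rfl hp | cons a b => exact ⟨a, b, rfl⟩
        rw [if_pos h, ih _ _ (by simp at hl ⊢; omega)]
        simp [pvRepl, h, List.drop_succ_cons]
      · rw [if_neg h, ih _ _ (by simp at hl ⊢; omega)]
        simp [pvRepl, h]

theorem pvReplace_eq (p u s : List Char) (hp : p ≠ []) :
    PySem.Chars.replace s p u = pvRepl p u s := by
  rw [PySem.Chars.replace, if_neg (by simp [hp]), pvGo_eq p u hp s.length s [] le_rfl]
  simp

-- a pattern that is no prefix of x in either direction is no prefix of x ++ y
theorem pvNot_prefix_append {p x : List Char} (y : List Char)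
    (h1 : ¬ p <+: x) (h2 : ¬ x <+: p) : ¬ p <+: (x ++ y) := by
  intro h
  exact (List.prefix_or_prefix_of_prefix h (List.prefix_append x y)).elim h1 h2

theorem pvNot_prefix_of_head_ne {p s : List Char} (hp : p ≠ []) (hs : s ≠ [])
    (h : s.head? ≠ p.head?) : p.isPrefixOf s = false := by
  match p, s with
  | ph :: pt, sh :: st =>
    simp only [List.head?] at h
    simp [List.isPrefixOf]
    intro hEq; exact absurd (by rw [hEq]) h

-- replacing inside x ++ y skips over x when no match can start strictly inside x
-- and none starts at its head
theorem pvRepl_append (p u : List Char) (hp : p ≠ []) :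
    ∀ (x y : List Char), (x ≠ [] → ¬ p.isPrefixOf (x ++ y) = true) →
      (∀ c ∈ x.tail, some c ≠ p.head?) →
      pvRepl p u (x ++ y) = x ++ pvRepl p u y := by
  intro x
  induction x with
  | nil => intro y _ _; rfl
  | cons c x' ih =>
    intro y h0 hc
    have hnp : ¬ p.isPrefixOf (c :: (x' ++ y)) = true := h0 (by simp)
    have hc' : ∀ a ∈ x'.tail, some a ≠ p.head? :=
      fun a ha => hc a (List.mem_of_mem_tail ha)
    have h0' : x' ≠ [] → ¬ p.isPrefixOf (x' ++ y) = true := by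
      intro hx'
      obtain ⟨c', x'', rfl⟩ := pvExists_cons hx' 
      have hhd : some c' ≠ p.head? := hc c' (by simp)
      have hf : p.isPrefixOf (c' :: (x'' ++ y)) = false := by
        apply pvNot_prefix_of_head_ne hp (by simp)
        simpa [List.head?] using hhd
      simp_all
    rw [List.cons_append, pvRepl, if_neg hnp, ih y h0' hc']
    simp

-- a full match at the head replaces and continues after it
theorem pvRepl_self (p u x : List Char) (hp : p ≠ []) :
    pvRepl p u (p ++ x) = u ++ pvRepl p u x := by
  obtain ⟨ph, pt, rfl⟩ := pvExists_cons hp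
  rw [List.cons_append, pvRepl,
    if_pos (by rw [List.isPrefixOf_iff_prefix]; exact List.prefix_append _ _)]
  simp

-- ASCII prefixes of the result of one replacement pass were prefixes already
theorem pvPrefix_repl (p u : List Char)
    (hun : u ≠ []) (hu : 127 < (u.headD ' ').toNat) :
    ∀ (s q : List Char), (∀ c ∈ q, c.toNat ≤ 127) →
      q.isPrefixOf (pvRepl p u s) = true → q.isPrefixOf s = true := by
  intro s
  induction s using pvRepl.induct p with
  | case1 => intro q _ h; rw [pvRepl_nil] at h; exact h
  | case2 c t hpre ih =>
    intro q hq h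
    rw [pvRepl, if_pos hpre] at h
    match q with
    | [] => simp [List.isPrefixOf]
    | qh :: q' =>
      obtain ⟨uh, ut, rfl⟩ := pvExists_cons hun
      simp only [List.cons_append, List.isPrefixOf] at h
      have h1 : qh = uh := by
        by_contra hne
        simp [beq_eq_false_iff_ne.mpr hne] at h
      have := hq qh (by simp)
      simp [List.headD] at hu
      rw [h1] at this; omega
  | case3 c t hpre ih =>
    intro q hq h
    rw [pvRepl, if_neg hpre] at h
    match q with
    | [] => simp [List.isPrefixOf]
    | qh :: q' =>
      simp only [List.isPrefixOf, Bool.and_eq_true] at h ⊢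
      exact ⟨h.1, ih q' (fun c hc => hq c (by simp [hc])) h.2⟩

-- membership of a pattern head in pvHeads
theorem pvHead_mem {T : List (List Char × List Char)} {m : List Char × List Char}
    (hm : m ∈ T) {h : Char} {t : List Char} (he : m.1 = h :: t) : h ∈ pvHeads T := by
  simp only [pvHeads, List.mem_filterMap]
  exact ⟨m, hm, by rw [he]; rfl⟩

-- when no pattern of the (Good) table matches at the head, the whole chain keeps the head
theorem pvChain_cons_nomatch (T : List (List Char × List Char)) (hG : pvGood T) :
    ∀ (c : Char) (t : List Char), (∀ m ∈ T, ¬ m.1.isPrefixOf (c :: t) = true) →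
      pvChain T (c :: t) = c :: pvChain T t := by
  induction T with
  | nil => intro c t _; rfl
  | cons m T ih =>
    intro c t h
    obtain ⟨hp, hascii, hu, _, _, _⟩ := hG m (by simp)
    have hstep : pvRepl m.1 m.2 (c :: t) = c :: pvRepl m.1 m.2 t := by
      rw [pvRepl, if_neg (h m (by simp))]
    have hnext : ∀ m' ∈ T, ¬ m'.1.isPrefixOf (c :: pvRepl m.1 m.2 t) = true := by
      intro m' hm' hpre
      obtain ⟨hp', hascii', _, _, _, _⟩ := hG m' (by simp [hm'])
      have : m'.1.isPrefixOf (pvRepl m.1 m.2 (c :: t)) = true := by rw [hstep]; exact hpre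
      exact h m' (by simp [hm']) (pvPrefix_repl m.1 m.2 hu.1 hu.2 (c :: t) m'.1 hascii' this)
    calc pvChain (m :: T) (c :: t)
        = pvChain T (pvRepl m.1 m.2 (c :: t)) := by simp [pvChain]
      _ = pvChain T (c :: pvRepl m.1 m.2 t) := by rw [hstep]
      _ = c :: pvChain T (pvRepl m.1 m.2 t) := ih (pvGood_cons hG) c (pvRepl m.1 m.2 t) hnext
      _ = c :: pvChain (m :: T) t := by simp [pvChain]

-- a fold of replacement passes none of which can start inside or at the head of x skips x
theorem pvFold_skip (L : List (List Char × List Char)) (x : List Char)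
    (h : ∀ m ∈ L, m.1 ≠ [] ∧ (x ≠ [] → ¬ m.1 <+: x ∧ ¬ x <+: m.1 ∨ (x.head? ≠ m.1.head?)) ∧
        (∀ c ∈ x.tail, some c ≠ m.1.head?)) :
    ∀ y, L.foldl (fun s m => pvRepl m.1 m.2 s) (x ++ y) =
      x ++ L.foldl (fun s m => pvRepl m.1 m.2 s) y := by
  induction L with
  | nil => intro y; rfl
  | cons m L ih =>
    intro y
    obtain ⟨hp, h0, hc⟩ := h m (by simp)
    have hstep : pvRepl m.1 m.2 (x ++ y) = x ++ pvRepl m.1 m.2 y := by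
      apply pvRepl_append m.1 m.2 hp x y ?_ hc
      intro hx
      rcases h0 hx with ⟨h1, h2⟩ | hhd
      · rw [List.isPrefixOf_iff_prefix]; exact pvNot_prefix_append y h1 h2
      · intro hpre
        have : m.1.isPrefixOf (x ++ y) = false := by
          apply pvNot_prefix_of_head_ne hp (by cases x <;> simp_all)
          cases x with
          | nil => exact absurd rfl hx
          | cons a b => simpa [List.head?] using hhd
        simp_all
    simp only [List.foldl_cons, hstep]
    exact ih (fun m' hm' => h m' (by simp [hm'])) (pvRepl m.1 m.2 y)

-- the key step: the first matching pattern governs the whole chain at a match position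
theorem pvChain_match (T : List (List Char × List Char)) (hG : pvGood T)
    (T1 T2 : List (List Char × List Char)) (m : List Char × List Char)
    (hsplit : T = T1 ++ m :: T2) (rest : List Char)
    (hnomatch : ∀ m1 ∈ T1, ¬ m1.1.isPrefixOf (m.1 ++ rest) = true) :
    pvChain T (m.1 ++ rest) = m.2 ++ pvChain T rest := by
  have hmT : m ∈ T := by rw [hsplit]; simp
  obtain ⟨hp, hascii, hu, htail, hrep, hnopre⟩ := hG m hmT
  obtain ⟨ph, pt, hm1⟩ := pvExists_cons hp
  -- fold over T1 keeps the m.1 prefix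
  have h1 : ∀ y, T1.foldl (fun s m => pvRepl m.1 m.2 s) (m.1 ++ y) =
      m.1 ++ T1.foldl (fun s m => pvRepl m.1 m.2 s) y := by
    apply pvFold_skip
    intro m1 hm1T
    have hm1T' : m1 ∈ T := by rw [hsplit]; simp [hm1T]
    obtain ⟨hp1, _, _, _, _, _⟩ := hG m1 hm1T'
    refine ⟨hp1, ?_, ?_⟩
    · intro _
      left
      have hne : m1.1 ≠ m.1 := by
        intro he
        exact hnomatch m1 hm1T (by rw [he, List.isPrefixOf_iff_prefix]; exact List.prefix_append _ _)
      obtain ⟨_, _, _, _, _, hnopre1⟩ := hG m1 hm1T'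
      exact ⟨hnopre m1 hm1T' hne, hnopre1 m hmT (fun he => hne he.symm)⟩
    · intro c hc
      have hcH : c ∉ pvHeads T := htail c hc
      intro he
      obtain ⟨h1c, t1c, hm11⟩ := pvExists_cons hp1
      rw [hm11] at he
      simp [List.head?] at he
      exact hcH (by rw [he]; exact pvHead_mem hm1T' hm11)
  -- fold over T2 skips the replacement m.2
  have h2 : ∀ y, T2.foldl (fun s m => pvRepl m.1 m.2 s) (m.2 ++ y) =
      m.2 ++ T2.foldl (fun s m => pvRepl m.1 m.2 s) y := by
    apply pvFold_skip
    intro m2 hm2T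
    have hm2T' : m2 ∈ T := by rw [hsplit]; simp [hm2T]
    obtain ⟨hp2, _, _, _, _, _⟩ := hG m2 hm2T'
    obtain ⟨h2c, t2c, hm21⟩ := pvExists_cons hp2
    have hheadmem : h2c ∈ pvHeads T := pvHead_mem hm2T' hm21
    refine ⟨hp2, ?_, ?_⟩
    · intro hne
      right
      obtain ⟨uh, ut, hu2⟩ := pvExists_cons hu.1
      rw [hu2, hm21]; simp [List.head?]
      intro he
      exact absurd hheadmem (he ▸ hrep uh (by rw [hu2]; simp))
    · intro c hc he
      rw [hm21] at he
      simp [List.head?] at he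
      exact hrep c (List.mem_of_mem_tail hc) (by rw [he]; exact hheadmem)
  calc pvChain T (m.1 ++ rest)
      = T2.foldl (fun s m => pvRepl m.1 m.2 s)
          (pvRepl m.1 m.2 (T1.foldl (fun s m => pvRepl m.1 m.2 s) (m.1 ++ rest))) := by
        rw [hsplit]; simp [pvChain, List.foldl_append]
    _ = T2.foldl (fun s m => pvRepl m.1 m.2 s)
          (m.2 ++ pvRepl m.1 m.2 (T1.foldl (fun s m => pvRepl m.1 m.2 s) rest)) := by
        rw [h1, pvRepl_self m.1 m.2 _ hp]
    _ = m.2 ++ pvChain T rest := by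
        rw [h2, hsplit]; simp [pvChain, List.foldl_append]

-- the main equivalence on char lists: A's chain of passes is B's single scan
theorem pvChain_eq_scan (T : List (List Char × List Char)) (hG : pvGood T) :
    ∀ (n : Nat) (s : List Char), s.length ≤ n → pvChain T s = pvScan T n s := by
  intro n
  induction n with
  | zero =>
    intro s hs
    have : s = [] := List.eq_nil_of_length_eq_zero (Nat.le_zero.mp hs)
    subst this; simpa [pvScan] using pvChain_nil T
  | succ f ih =>
    intro s hs
    match s with
    | [] => simpa [pvScan] using pvChain_nil T
    | c :: t =>
      rw [pvScan]
      cases hfind : T.find? (fun m => m.1.isPrefixOf (c :: t)) with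
      | none =>
        have hno : ∀ m ∈ T, ¬ m.1.isPrefixOf (c :: t) = true := by
          intro m hm
          exact by simpa using List.find?_eq_none.mp hfind m hm
        rw [pvChain_cons_nomatch T hG c t hno, ih t (by simp at hs; omega)]
      | some m =>
        obtain ⟨hpre, T1, T2, hsplit, hbefore⟩ := List.find?_eq_some_iff_append.mp hfind
        obtain ⟨rest, hrest0⟩ := List.isPrefixOf_iff_prefix.mp hpre
        have hrest : c :: t = m.1 ++ rest := hrest0.symm
        obtain ⟨hp, _, _, _, _, _⟩ := hG m (by rw [hsplit]; simp)
        have hdrop : (c :: t).drop m.1.length = rest := by rw [hrest]; exact List.drop_left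
        have hlen : rest.length ≤ f := by
          have := congrArg List.length hrest
          simp at this hs
          cases hx : m.1 with
          | nil => exact absurd hx hp
          | cons a b => rw [hx] at this; simp at this; omega
        have hno1 : ∀ m1 ∈ T1, ¬ m1.1.isPrefixOf (m.1 ++ rest) = true := by
          intro m1 h1
          have hb := hbefore m1 h1
          rw [Bool.not_eq_true'] at hb
          rw [← hrest, hb]; simp
        rw [hrest, pvChain_match T hG T1 T2 m hsplit rest hno1, ih rest hlen]
        simp

-- boolean form of pvGood, evaluated by decide on the concrete table
def pvGoodB (T : List (List Char × List Char)) : Bool :=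
  T.all (fun m =>
    (!m.1.isEmpty) &&
    m.1.all (fun c => c.toNat ≤ 127) &&
    ((!m.2.isEmpty) && decide (127 < (m.2.headD ' ').toNat)) &&
    m.1.tail.all (fun c => !(pvHeads T).contains c) &&
    m.2.all (fun c => !(pvHeads T).contains c) &&
    T.all (fun m' => m'.1 == m.1 || !m'.1.isPrefixOf m.1))

theorem pvGood_of_B (T : List (List Char × List Char)) (h : pvGoodB T = true) : pvGood T := by
  rw [pvGoodB, List.all_eq_true] at h
  intro m hm
  have hm' := h m hm
  simp only [Bool.and_eq_true, List.all_eq_true, Bool.not_eq_true', decide_eq_true_iff,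
    Bool.or_eq_true, beq_iff_eq, List.isEmpty_eq_false_iff, List.contains_eq_mem,
    decide_eq_false_iff_not] at hm'
  obtain ⟨⟨⟨⟨⟨h1, h2⟩, h3⟩, h4⟩, h5⟩, h6⟩ := hm'
  refine ⟨h1, h2, h3, h4, h5, fun m' hm'' hne => ?_⟩
  have := (h6 m' hm'').resolve_left hne
  rw [← List.isPrefixOf_iff_prefix, this]; simp

-- the concrete table satisfies the conditions
theorem pvGood_pvMonths : pvGood pvMonths := pvGood_of_B _ (by decide)

-- A's string-level fold equals the char-list chain
theorem pvA_toList (date : String) :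
    (translate_month_to_ukr date).toList = pvChain pvMonths date.toList := by
  have h : ∀ (L : List (String × String)) (d : String),
      (∀ m ∈ L, m.1.toList ≠ []) →
      (L.foldl (fun d m => PySem.Str.replace d m.1 m.2) d).toList =
        (L.map (fun m => (m.1.toList, m.2.toList))).foldl (fun s m => pvRepl m.1 m.2 s) d.toList := by
    intro L
    induction L with
    | nil => intro d _; rfl
    | cons m L ih =>
      intro d hL
      simp only [List.foldl_cons, List.map_cons]
      rw [ih _ (fun m' hm' => hL m' (by simp [hm']))]
      congr 1
      rw [show (PySem.Str.replace d m.1 m.2).toList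
            = PySem.Chars.replace d.toList m.1.toList m.2.toList from PySem.Str.toList_replace .. ,
          pvReplace_eq _ _ _ (hL m (by simp))]
  rw [translate_month_to_ukr, h _ date (by decide)]
  congr 1

-- ===== VERDICT (by name: the statement is the Claim_ definition above) =====
theorem translate_month_to_ukr_spec : Claim_equal_translate_month_to_ukr := by
  intro date _
  unfold Spec_translate_month_to_ukr translate_month_to_ukr_alt
  have h := pvChain_eq_scan pvMonths pvGood_pvMonths date.toList.length date.toList le_rfl
  have := pvA_toList date
  rw [h] at this
  calc translate_month_to_ukr date
      = String.ofList (translate_month_to_ukr date).toList := by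
        rw [String.ofList_toList]
    _ = String.ofList (pvScan pvMonths date.toList.length date.toList) := by rw [this]
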